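-- pv_equiv track=rewrite | github.com/daniel-reich/ubiquitous-fiesta | xYRNzJB7kAXXEQSdF_15.py | wiggle_string
-- ===== SOURCE A (Python) =====
-- def wiggle_string(s):
--     i = 0
--     result = []
--     while i < len(s):
--         result.append(" " * i + s )
--         i += 1
--     while i > -1:
--         result.append(" " * i + s)
--         i -= 1
--     return result
-- ===== SOURCE B (Python) =====
-- def wiggle_string(s):
--     n = len(s)
--     result = [""] * (2 * n + 1)
--     result[n] = " " * n + s
--     for i in range(n - 1, -1, -1):
--         line = " " * i + s
--         result[i] = line
--         result[2 * n - i] = line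
--     return result
-- ===== Notes on version B (the rewrite author's own statement) =====
-- stated objective: alternative
-- what changed: B preallocates the 2n+1-slot output and fills it middle-out with one descending loop, writing each line once into its two mirror positions i and 2n-i, instead of A's two index-driven while loops that each rebuild every row's padding from its index.
import Mathlib
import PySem

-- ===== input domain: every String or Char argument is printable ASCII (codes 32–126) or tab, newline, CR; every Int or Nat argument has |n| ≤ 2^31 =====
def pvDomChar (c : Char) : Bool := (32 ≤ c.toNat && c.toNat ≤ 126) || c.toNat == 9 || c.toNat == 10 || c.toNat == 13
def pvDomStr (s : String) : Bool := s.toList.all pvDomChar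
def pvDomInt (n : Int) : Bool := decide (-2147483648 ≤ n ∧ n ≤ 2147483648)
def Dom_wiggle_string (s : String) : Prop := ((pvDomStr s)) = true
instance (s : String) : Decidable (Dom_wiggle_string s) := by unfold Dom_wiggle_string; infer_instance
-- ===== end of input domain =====

-- B preallocates the 2n+1-slot output and fills it middle-out, writing each line once into its
-- two mirror positions, instead of A's two index-driven while loops (same asymptotic cost).

-- ===== PORT A =====
-- " " * i + s  (exact: for i ≥ 0 it is i spaces then s, built over List Char, not Lean's opaque String.append)
def pvLine (i : Int) (s : String) : String := String.ofList (List.replicate i.toNat ' ' ++ s.toList)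

-- first while loop: while i < len(s): result.append(" "*i + s); i += 1   (fuel = len(s) - i)
def pvWsUp (s : String) (i : Nat) : Nat → List String
  | 0 => []
  | fuel + 1 => pvLine (i : Int) s :: pvWsUp s (i + 1) fuel

-- second while loop: while i > -1: result.append(" "*i + s); i -= 1   (i counts len(s) down to 0)
def pvWsDown (s : String) : Nat → List String
  | 0 => [pvLine 0 s]
  | i + 1 => pvLine ((i : Int) + 1) s :: pvWsDown s i

def wiggle_string (s : String) : List String :=
  pvWsUp s 0 s.toList.length ++ pvWsDown s s.toList.length

-- ===== PORT B =====
-- for i in range(n-1, -1, -1): result[i] = line; result[2*n-i] = line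
-- pvFill s n k res runs the remaining k iterations (indices k-1 down to 0)
def pvFill (s : String) (n : Nat) : Nat → List String → List String
  | 0, res => res
  | i + 1, res =>
      pvFill s n i ((res.set i (pvLine (i : Int) s)).set (2 * n - i) (pvLine (i : Int) s))

-- n = len(s); result = [""] * (2*n+1); result[n] = " "*n + s; loop; return result
def wiggle_string_alt (s : String) : List String :=
  pvFill s s.toList.length s.toList.length
    ((List.replicate (2 * s.toList.length + 1) "").set s.toList.length
      (pvLine (s.toList.length : Int) s))

-- ===== PRECONDITION & SPEC =====
def Spec_wiggle_string (s : String) (out : List String) : Prop := out = wiggle_string_alt s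
instance (s : String) (out : List String) : Decidable (Spec_wiggle_string s out) := by unfold Spec_wiggle_string; infer_instance

-- ===== CLAIM (what is proved, stated in full; the proofs are below) =====
def Claim_equal_wiggle_string : Prop := ∀ (s : String), Dom_wiggle_string s → Spec_wiggle_string s (wiggle_string s)

-- ===== LEMMAS AND PROOFS =====

theorem pvWsUp_eq (s : String) : ∀ (fuel i : Nat),
    pvWsUp s i fuel = (List.range fuel).map (fun (k : Nat) => pvLine ((i : Int) + (k : Int)) s) := by
  intro fuel
  induction fuel with
  | zero => intro i; simp [pvWsUp]
  | succ n ih =>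
    intro i
    rw [List.range_succ_eq_map]
    simp only [pvWsUp, List.map_cons, List.map_map, ih (i + 1)]
    refine congrArg₂ _ (by norm_num) ?_
    apply List.map_congr_left
    intro k _
    simp only [Function.comp]
    congr 1
    push_cast
    ring

theorem pvWsDown_eq (s : String) : ∀ (i : Nat),
    pvWsDown s i = ((List.range (i + 1)).map (fun (k : Nat) => pvLine (k : Int) s)).reverse := by
  intro i
  induction i with
  | zero => simp [pvWsDown]
  | succ n ih =>
    rw [List.range_succ (n := n + 1)]
    simp only [pvWsDown, ih, List.map_append, List.reverse_append]
    simp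

theorem pvFill_getElem? (s : String) (n : Nat) : ∀ (k : Nat) (res : List String) (j : Nat),
    k ≤ n → res.length = 2 * n + 1 →
    (pvFill s n k res)[j]? =
      if j < k then some (pvLine (j : Int) s)
      else if 2 * n - k < j ∧ j ≤ 2 * n then some (pvLine ((2 * n - j : Nat) : Int) s)
      else res[j]? := by
  intro k
  induction k with
  | zero =>
    intro res j _ _
    simp only [pvFill]
    have h1 : ¬ j < 0 := by omega
    have h2 : ¬ (2 * n - 0 < j ∧ j ≤ 2 * n) := by omega
    rw [if_neg h1, if_neg h2]
  | succ i ih =>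
    intro res j hk hlen
    have hlen2 : ((res.set i (pvLine (i : Int) s)).set (2 * n - i)
        (pvLine (i : Int) s)).length = 2 * n + 1 := by simp [hlen]
    rw [pvFill, ih _ j (by omega) hlen2]
    by_cases hji : j < i
    · rw [if_pos hji, if_pos (by omega)]
    · rw [if_neg hji]
      by_cases hje : j = i
      · -- j = i: the left write of this iteration
        subst hje
        rw [if_neg (by omega), if_pos (by omega),
          List.getElem?_set_ne (by omega),
          List.getElem?_set_eq_of_lt _ (by rw [hlen]; omega)]
      · by_cases hmid : 2 * n - i < j ∧ j ≤ 2 * n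
        · -- already-written right half
          rw [if_pos hmid, if_neg (by omega), if_pos (by omega)]
        · rw [if_neg hmid]
          by_cases hjr : j = 2 * n - i
          · -- j = 2n - i: the right write of this iteration
            subst hjr
            rw [List.getElem?_set_eq_of_lt _ (by rw [List.length_set, hlen]; omega),
              if_neg (by omega), if_pos (by omega)]
            congr 2
            omega
          · -- untouched slot
            rw [List.getElem?_set_ne (by omega), List.getElem?_set_ne (by omega),
              if_neg (by omega), if_neg (by omega)]

theorem canon_getElem? (s : String) (n : Nat) (j : Nat) :
    ((List.range n).map (fun (k : Nat) => pvLine (k : Int) s) ++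
      ((List.range (n + 1)).map (fun (k : Nat) => pvLine (k : Int) s)).reverse)[j]? =
      if j < n then some (pvLine (j : Int) s)
      else if j ≤ 2 * n then some (pvLine ((2 * n - j : Nat) : Int) s)
      else none := by
  by_cases h1 : j < n
  · rw [List.getElem?_append_left (by simp [h1]), if_pos h1]
    simp [h1]
  · rw [List.getElem?_append_right (by simp; omega), if_neg h1]
    by_cases h2 : j ≤ 2 * n
    · rw [if_pos h2]
      have hlt : j - (List.map (fun (k : Nat) => pvLine (k : Int) s) (List.range n)).length
          < ((List.map (fun (k : Nat) => pvLine (k : Int) s) (List.range (n + 1))).reverse).length := by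
        simp; omega
      rw [List.getElem?_eq_getElem hlt, List.getElem_reverse]
      simp only [List.getElem_map, List.getElem_range, List.length_map, List.length_range]
      congr 2
      simp at hlt ⊢
      omega
    · rw [if_neg h2, List.getElem?_eq_none]
      simp
      omega

-- ===== VERDICT (by name: the statement is the Claim_ definition above) =====
theorem wiggle_string_spec : Claim_equal_wiggle_string := by
  intro s _
  unfold Spec_wiggle_string wiggle_string wiggle_string_alt
  apply List.ext_getElem?
  intro j
  rw [pvWsUp_eq, pvWsDown_eq]
  simp only [Int.ofNat_zero, zero_add]
  rw [canon_getElem? s s.toList.length j,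
    pvFill_getElem? s s.toList.length s.toList.length _ j le_rfl
      (by simp only [List.length_set, List.length_replicate])]
  by_cases h1 : j < s.toList.length
  · rw [if_pos h1, if_pos h1]
  · by_cases hj : j = s.toList.length
    · -- j = n: the preset peak slot
      subst hj
      rw [if_neg h1, if_neg h1, if_pos (by omega), if_neg (by omega),
        List.getElem?_set_eq_of_lt _
          (by simp only [List.length_replicate]; omega)]
      congr 2
      omega
    · by_cases h2 : j ≤ 2 * s.toList.length
      · rw [if_neg h1, if_neg h1, if_pos h2, if_pos (by omega)]
      · rw [if_neg h1, if_neg h1, if_neg h2, if_neg (by omega)]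
        exact (List.getElem?_eq_none
          (by simp only [List.length_set, List.length_replicate]; omega)).symm
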